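-- pv_equiv track=rewrite | github.com/tsuru7/algorithm-study | AtCoder/ABC/201-300/ABC254/E-3.py | bfs
-- ===== SOURCE A (Python) =====
-- from collections import deque
--
-- def bfs(x, k, graph):
--     ans = 0
--     queue = deque()
--     depth = dict()
--     queue.append(x)
--     depth[x] = 0
--     while len(queue) > 0:
--         u = queue.popleft()
--         ans += u+1
--         for v in graph[u]:
--             if v in depth:
--                 continue
--             depth[v] = depth[u] + 1
--             if depth[v] <= k:
--                 queue.append(v)
--     return ans
-- ===== SOURCE B (Python) =====
-- def bfs(x, k, graph):
--     # Level-synchronous BFS: per-depth frontier lists + a visited set; no queue, no depth dict.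
--     visited = {x}
--     frontier = [x]
--     ans = 0
--     d = 0
--     while frontier:
--         for u in frontier:
--             ans += u + 1
--         nxt = []
--         for u in frontier:
--             for v in graph[u]:
--                 if v not in visited:
--                     visited.add(v)
--                     nxt.append(v)
--         if d >= k:
--             break
--         frontier = nxt
--         d += 1
--     return ans
-- ===== Notes on version B (the rewrite author's own statement) =====
-- stated objective: alternative
-- what changed: A's FIFO queue plus per-node depth dictionary is replaced by a level-synchronous BFS that keeps only a visited set and a frontier list per depth, looping at most k times; correctness rests on the answer being an order-independent sum over the nodes within distance k.
import Mathlib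
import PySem

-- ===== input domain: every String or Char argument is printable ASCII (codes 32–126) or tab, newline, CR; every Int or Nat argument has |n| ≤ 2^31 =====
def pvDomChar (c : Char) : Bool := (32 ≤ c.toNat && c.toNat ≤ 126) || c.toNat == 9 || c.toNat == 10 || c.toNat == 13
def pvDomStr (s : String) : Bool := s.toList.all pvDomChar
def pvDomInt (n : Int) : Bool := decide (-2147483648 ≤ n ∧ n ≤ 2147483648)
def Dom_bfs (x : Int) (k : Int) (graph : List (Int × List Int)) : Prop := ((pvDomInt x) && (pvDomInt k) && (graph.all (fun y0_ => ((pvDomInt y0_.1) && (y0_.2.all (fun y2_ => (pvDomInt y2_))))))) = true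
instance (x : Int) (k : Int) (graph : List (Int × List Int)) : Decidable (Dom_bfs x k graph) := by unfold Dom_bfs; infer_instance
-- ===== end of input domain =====

-- B replaces A's FIFO queue + per-node depth dictionary by a level-synchronous BFS: per-depth frontier lists and a visited set (alternative decomposition, same cost).

-- ===== PORT A =====
-- one iteration of A's inner 'for v in graph[u]' loop on the (queue, depth) state
def bfsAStep (k u : Int) (st : List Int × PySem.Dict Int Int) (v : Int) : List Int × PySem.Dict Int Int :=
  if (st.2.get? v).isSome then st          -- 'if v in depth: continue'
  else
    let dv := st.2.getD u 0 + 1            -- 'depth[v] = depth[u] + 1' (u is always a key of depth, so getD is exact)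
    let depth := st.2.insert v dv
    if dv ≤ k then (st.1 ++ [v], depth) else (st.1, depth)

-- A's 'while len(queue) > 0' loop; fuel is only a totality guard: every dequeue after the first
-- consumed a fresh depth insertion of some listed neighbour, so (total neighbour occurrences) + 2 always suffices
def bfsLoop (graph : List (Int × List Int)) (k : Int) :
    Nat → List Int → PySem.Dict Int Int → Int → Int
  | 0, _, _, ans => ans
  | _ + 1, [], _, ans => ans
  | fuel + 1, u :: qs, depth, ans =>
      let st := ((PySem.Dict.mk graph).getD u []).foldl (bfsAStep k u) (qs, depth)
      bfsLoop graph k fuel st.1 st.2 (ans + (u + 1))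

def bfs (x : Int) (k : Int) (graph : List (Int × List Int)) : Int :=
  bfsLoop graph k ((graph.flatMap (fun p => p.2)).length + 2) [x] (PySem.Dict.empty.insert x 0) 0

-- ===== PORT B =====
-- one iteration of B's inner 'for v in graph[u]' loop on the (nxt, visited) state
def bfsBStep (st : List Int × PySem.Set Int) (v : Int) : List Int × PySem.Set Int :=
  if PySem.Set.contains st.2 v then st     -- 'if v not in visited'
  else (st.1 ++ [v], PySem.Set.add st.2 v)

-- B's 'for u in frontier' expansion loop body
def bfsExpand (graph : List (Int × List Int)) (st : List Int × PySem.Set Int) (u : Int) :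
    List Int × PySem.Set Int :=
  ((PySem.Dict.mk graph).getD u []).foldl bfsBStep st

-- B's 'while frontier' loop; the countdown n is (k - d).toNat, so 'n = 0' is Python's 'if d >= k: break'
def bfsAltLoop (graph : List (Int × List Int)) : Nat → List Int → PySem.Set Int → Int → Int
  | _, [], _, ans => ans
  | n, u :: fr, visited, ans =>
      let ans := (u :: fr).foldl (fun a w => a + (w + 1)) ans
      let st := (u :: fr).foldl (bfsExpand graph) ([], visited)
      match n with
      | 0 => ans
      | m + 1 => bfsAltLoop graph m st.1 st.2 ans

def bfs_alt (x : Int) (k : Int) (graph : List (Int × List Int)) : Int :=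
  bfsAltLoop graph k.toNat [x] (PySem.Set.ofList [x]) 0

-- ===== PRECONDITION & SPEC =====
-- the radius-n ball around x: one ballStep adds every listed neighbour of the current members
def ballStep (g : PySem.Dict Int (List Int)) (S : List Int) : List Int :=
  S.foldl (fun acc u => (g.getD u []).foldl (fun acc v => if v ∈ acc then acc else acc ++ [v]) acc) S

def ball (g : PySem.Dict Int (List Int)) (x : Int) : Nat → List Int
  | 0 => [x]
  | n + 1 => ballStep g (ball g x n)

-- Pre_bfs holds exactly on the inputs where Python's A returns: every node within BFS distance ≤ k of x
-- (the radius-k ball; it stabilizes within min(k, |graph|) expansion steps, so that bound is exact) is a key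
-- of graph.  Outside Pre_bfs both A and my B raise KeyError at graph[u], so no input on which A returns a
-- value is excluded.
def Pre_bfs (x : Int) (k : Int) (graph : List (Int × List Int)) : Prop :=
  ∀ v ∈ ball (PySem.Dict.mk graph) x (min k.toNat graph.length),
    ((PySem.Dict.mk graph).get? v).isSome = true
instance (x : Int) (k : Int) (graph : List (Int × List Int)) : Decidable (Pre_bfs x k graph) := by
  unfold Pre_bfs; infer_instance

def pvWitness_bfs : Int × Int × (List (Int × List Int)) := (0, 2, [(0, [1]), (1, [0, 2]), (2, [])])

def Spec_bfs (x : Int) (k : Int) (graph : List (Int × List Int)) (out : Int) : Prop := out = bfs_alt x k graph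
instance (x : Int) (k : Int) (graph : List (Int × List Int)) (out : Int) : Decidable (Spec_bfs x k graph out) := by unfold Spec_bfs; infer_instance

-- ===== CLAIM (what is proved, stated in full; the proofs are below) =====
def Claim_equal_bfs : Prop := ∀ (x : Int) (k : Int) (graph : List (Int × List Int)), Dom_bfs x k graph → Pre_bfs x k graph → Spec_bfs x k graph (bfs x k graph)

-- ===== LEMMAS AND PROOFS =====

-- sum of (u+1) over a list (proof-side only)
def sumPlus (L : List Int) : Int := (L.map (· + 1)).sum

@[simp] lemma sumPlus_nil : sumPlus [] = 0 := rfl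
@[simp] lemma sumPlus_cons (u : Int) (L : List Int) : sumPlus (u :: L) = (u + 1) + sumPlus L := by
  simp [sumPlus]

-- B's counting loop is adding sumPlus of the frontier
lemma count_fold (L : List Int) (a : Int) :
    L.foldl (fun a w => a + (w + 1)) a = a + sumPlus L := by
  unfold sumPlus
  exact PySem.List.foldl_add _ _ _

-- every listed neighbour lies in the concatenation of all adjacency lists
lemma getD_mk_subset (graph : List (Int × List Int)) (u v : Int)
    (h : v ∈ (PySem.Dict.mk graph).getD u []) : v ∈ graph.flatMap (fun p => p.2) := by
  induction graph with
  | nil =>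
    rw [PySem.Dict.getD_eq_get?_getD] at h
    cases h
  | cons p rest ih =>
    obtain ⟨a, b⟩ := p
    rw [PySem.Dict.getD_eq_get?_getD, PySem.Dict.get?_mk_cons] at h
    by_cases hau : (a == u) = true
    · simp only [hau, if_true, Option.getD_some] at h
      exact List.mem_flatMap.mpr ⟨(a, b), List.mem_cons_self .., h⟩
    · simp only [hau, if_false, Bool.false_eq_true] at h
      rw [← PySem.Dict.getD_eq_get?_getD] at h
      have := ih h
      simp only [List.flatMap_cons, List.mem_append]
      exact Or.inr this
  
-- number of occurrences in ks (the multiset of listed neighbours) not yet recorded in the depth dict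
def freshCount (ks : List Int) (D : PySem.Dict Int Int) : Nat :=
  (ks.filter (fun w => (D.get? w).isNone)).length

lemma get?_insert_isNone (D : PySem.Dict Int Int) (v dv : Int) (w : Int) :
    (((D.insert v dv).get? w).isNone) = (((D.get? w).isNone) && !(w == v)) := by
  rcases eq_or_ne w v with h | h
  · subst h; simp [PySem.Dict.get?_insert_self]
  · rw [PySem.Dict.get?_insert_of_ne (hne := h)]; simp [h]

lemma filter_len_mono (ks : List Int) (p : Int → Bool) (v : Int) :
    (ks.filter (fun w => p w && !(w == v))).length ≤ (ks.filter p).length := by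
  apply List.Sublist.length_le
  apply List.monotone_filter_right
  intro a ha; exact (Bool.and_elim_left ha)

lemma filter_len_lt (ks : List Int) (p : Int → Bool) (v : Int) (hv : v ∈ ks) (hp : p v = true) :
    (ks.filter (fun w => p w && !(w == v))).length + 1 ≤ (ks.filter p).length := by
  induction ks with
  | nil => cases hv
  | cons w ks ih =>
    simp only [List.filter_cons]
    rcases eq_or_ne w v with h | h
    · subst h
      have h1 := filter_len_mono ks p w
      simp [hp]
      omega
    · have hne : (w == v) = false := by simp [h]
      rcases List.mem_cons.mp hv with h' | h'
      · exact absurd h'.symm h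
      · have := ih h'
        by_cases hw : p w = true
        · simp only [hw, hne, Bool.not_false, Bool.and_true, if_true, List.length_cons]
          omega
        · simp only [Bool.not_eq_true] at hw
          simp only [hw, Bool.false_and, if_false, Bool.false_eq_true]
          omega

lemma freshCount_filter_eq (ks : List Int) (D : PySem.Dict Int Int) (v dv : Int) :
    freshCount ks (D.insert v dv) =
      (ks.filter (fun w => (D.get? w).isNone && !(w == v))).length := by
  unfold freshCount
  congr 1
  apply List.filter_congr
  intro w _
  exact get?_insert_isNone D v dv w

lemma freshCount_insert_lt (ks : List Int) (D : PySem.Dict Int Int) (v dv : Int)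
    (hv : v ∈ ks) (hfresh : D.get? v = none) :
    freshCount ks (D.insert v dv) + 1 ≤ freshCount ks D := by
  rw [freshCount_filter_eq]
  exact filter_len_lt ks _ v hv (by simp [hfresh])

@[simp] lemma bfsLoop_nil (graph : List (Int × List Int)) (k : Int) (fuel : Nat)
    (D : PySem.Dict Int Int) (a : Int) : bfsLoop graph k fuel [] D a = a := by
  cases fuel <;> rfl

-- A's inner fold when the new depth d+1 exceeds k: the queue is unchanged and existing depth entries survive
lemma afold_drain (k u d : Int) (hk : ¬ d + 1 ≤ k) :
    ∀ (ns q : List Int) (D : PySem.Dict Int Int), D.get? u = some d →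
      (ns.foldl (bfsAStep k u) (q, D)).1 = q ∧
      (∀ w, (D.get? w).isSome → (ns.foldl (bfsAStep k u) (q, D)).2.get? w = D.get? w) := by
  intro ns
  induction ns with
  | nil => intro q D hu; exact ⟨rfl, fun w _ => rfl⟩
  | cons v ns ih =>
    intro q D hu
    by_cases hv : (D.get? v).isSome
    · simp only [List.foldl_cons, bfsAStep, hv, if_true]
      exact ih q D hu
    · have hvn : D.get? v = none := by
        cases h : D.get? v with
        | none => rfl
        | some _ => rw [h] at hv; simp at hv
      have hne : u ≠ v := by
        intro e; rw [e, hvn] at hu; cases hu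
      have hgd : D.getD u 0 = d := by
        rw [PySem.Dict.getD_eq_get?_getD, hu]; rfl
      simp only [List.foldl_cons, bfsAStep, hv, if_false, Bool.false_eq_true, hgd, hk]
      obtain ⟨h1, h2⟩ := ih q (D.insert v (d + 1))
        (by rw [PySem.Dict.get?_insert_of_ne (hne := hne)]; exact hu)
      refine ⟨h1, fun w hw => ?_⟩
      have hwv : w ≠ v := by
        intro e; subst e; rw [hvn] at hw; cases hw
      rw [h2 w (by rw [PySem.Dict.get?_insert_of_ne (hne := hwv)]; exact hw),
        PySem.Dict.get?_insert_of_ne (hne := hwv)]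

-- draining the final level: every queued node has depth d with d+1 > k, so A only adds the queued values up
lemma bfsLoop_drain (graph : List (Int × List Int)) (k d : Int) (hk : ¬ d + 1 ≤ k) :
    ∀ (L : List Int) (fuel : Nat) (D : PySem.Dict Int Int) (a : Int),
      L.length ≤ fuel → (∀ u ∈ L, D.get? u = some d) →
      bfsLoop graph k fuel L D a = a + sumPlus L := by
  intro L
  induction L with
  | nil => intro fuel D a _ _; simp
  | cons u L ih =>
    intro fuel D a hfuel hdep
    obtain ⟨f, rfl⟩ : ∃ f, fuel = f + 1 := ⟨fuel - 1, by simp at hfuel; omega⟩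
    have hu : D.get? u = some d := hdep u (List.mem_cons_self ..)
    obtain ⟨h1, h2⟩ := afold_drain k u d hk ((PySem.Dict.mk graph).getD u []) L D hu
    simp only [bfsLoop]
    rw [h1, ih f _ (a + (u + 1)) (by simp at hfuel; omega)
      (fun w hw => by
        rw [h2 w (by rw [hdep w (List.mem_cons_of_mem _ hw)]; rfl)]
        exact hdep w (List.mem_cons_of_mem _ hw))]
    simp only [sumPlus_cons]
    ring

-- one adjacency list, expanding case: A's fold on (queue, depth) mirrors B's fold on (nxt, visited)
lemma afold_expand (ks : List Int) (k u d : Int) (hk : d + 1 ≤ k) (C : List Int) :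
    ∀ (ns nf : List Int) (D : PySem.Dict Int Int) (V : PySem.Set Int),
      D.get? u = some d →
      (∀ w, (D.get? w).isSome = true ↔ w ∈ V) →
      (∀ y ∈ C, D.get? y = some d) →
      (∀ w ∈ nf, D.get? w = some (d + 1)) →
      (∀ v ∈ ns, v ∈ ks) →
      (ns.foldl (bfsAStep k u) (C ++ nf, D)).1 = C ++ (ns.foldl bfsBStep (nf, V)).1 ∧
      (ns.foldl (bfsAStep k u) (C ++ nf, D)).2.get? u = some d ∧
      (∀ w, ((ns.foldl (bfsAStep k u) (C ++ nf, D)).2.get? w).isSome = true ↔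
            w ∈ (ns.foldl bfsBStep (nf, V)).2) ∧
      (∀ y ∈ C, (ns.foldl (bfsAStep k u) (C ++ nf, D)).2.get? y = some d) ∧
      (∀ w ∈ (ns.foldl bfsBStep (nf, V)).1,
            (ns.foldl (bfsAStep k u) (C ++ nf, D)).2.get? w = some (d + 1)) ∧
      freshCount ks (ns.foldl (bfsAStep k u) (C ++ nf, D)).2 + (ns.foldl bfsBStep (nf, V)).1.length ≤
        freshCount ks D + nf.length := by
  intro ns
  induction ns with
  | nil =>
    intro nf D V hu hmem hC hnf _
    exact ⟨rfl, hu, hmem, hC, hnf, le_refl _⟩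
  | cons v ns ih =>
    intro nf D V hu hmem hC hnf hns
    by_cases hv : (D.get? v).isSome
    · have hvV : v ∈ V := (hmem v).mp hv
      have hcont : PySem.Set.contains V v = true := (PySem.Set.contains_iff ..).mpr hvV
      simp only [List.foldl_cons, bfsAStep, bfsBStep, hv, hcont, if_true]
      exact ih nf D V hu hmem hC hnf (fun w hw => hns w (List.mem_cons_of_mem _ hw))
    · have hvn : D.get? v = none := by
        cases h : D.get? v with
        | none => rfl
        | some _ => rw [h] at hv; simp at hv
      have hvV : v ∉ V := fun h => by
        have := (hmem v).mpr h; rw [hvn] at this; cases this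
      have hcont : PySem.Set.contains V v = false := by
        cases h : PySem.Set.contains V v with
        | false => rfl
        | true => exact absurd ((PySem.Set.contains_iff ..).mp h) hvV
      have hne : u ≠ v := by
        intro e; rw [e, hvn] at hu; cases hu
      have hgd : D.getD u 0 = d := by
        rw [PySem.Dict.getD_eq_get?_getD, hu]; rfl
      simp only [List.foldl_cons, bfsAStep, bfsBStep, hv, hcont, if_false, Bool.false_eq_true,
        hgd, hk, if_true]
      have hfresh := freshCount_insert_lt ks D v (d + 1) (hns v (List.mem_cons_self ..)) hvn
      have step := ih (nf ++ [v]) (D.insert v (d + 1)) (PySem.Set.add V v)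
        (by rw [PySem.Dict.get?_insert_of_ne (hne := hne)]; exact hu)
        (by
          intro w
          rcases eq_or_ne w v with hwv | hwv
          · subst hwv
            simp [PySem.Dict.get?_insert_self, PySem.Set.mem_add]
          · rw [PySem.Dict.get?_insert_of_ne (hne := hwv), PySem.Set.mem_add]
            constructor
            · intro h; exact Or.inl ((hmem w).mp h)
            · intro h
              rcases h with h | h
              · exact (hmem w).mpr h
              · exact absurd h hwv)
        (by
          intro y hy
          have hyv : y ≠ v := by
            intro e; subst e; rw [hC y hy] at hvn; cases hvn
          rw [PySem.Dict.get?_insert_of_ne (hne := hyv)]; exact hC y hy)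
        (by
          intro w hw
          rcases List.mem_append.mp hw with h | h
          · have hwv : w ≠ v := by
              intro e; subst e; rw [hnf w h] at hvn; cases hvn
            rw [PySem.Dict.get?_insert_of_ne (hne := hwv)]; exact hnf w h
          · rcases List.mem_singleton.mp h with rfl
            exact PySem.Dict.get?_insert_self ..)
        (fun w hw => hns w (List.mem_cons_of_mem _ hw))
      rw [show C ++ (nf ++ [v]) = C ++ nf ++ [v] from (List.append_assoc C nf [v]).symm] at step
      refine ⟨step.1, step.2.1, step.2.2.1, step.2.2.2.1, step.2.2.2.2.1, ?_⟩
      have := step.2.2.2.2.2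
      simp only [List.length_append, List.length_singleton] at this
      omega

-- the main simulation: A's queue F ++ acc (F at depth d, acc at depth d+1) against B's level-synchronous state
lemma bfsLoop_eq_alt (graph : List (Int × List Int)) (k : Int) :
    ∀ (m fuel : Nat) (d : Int) (F acc : List Int) (D : PySem.Dict Int Int) (V : PySem.Set Int) (a : Int),
      2 * fuel + (if F = [] then 1 else 0) ≤ m →
      d + 1 ≤ k →
      (∀ u ∈ F, D.get? u = some d) →
      (∀ v ∈ acc, D.get? v = some (d + 1)) →
      (∀ w, (D.get? w).isSome = true ↔ w ∈ V) →
      F.length + acc.length + freshCount (graph.flatMap (fun p => p.2)) D ≤ fuel →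
      bfsLoop graph k fuel (F ++ acc) D a =
        (let st := F.foldl (bfsExpand graph) (acc, V)
         bfsAltLoop graph (k - (d + 1)).toNat st.1 st.2 (a + sumPlus F)) := by
  intro m
  induction m with
  | zero =>
    intro fuel d F acc D V a hm
    cases F with
    | nil => simp at hm
    | cons u F =>
      intro _ _ _ _ hfuel
      simp only [List.length_cons] at hfuel
      omega
  | succ m ih =>
    intro fuel d F acc D V a hm hd hF hacc hmem hfuel
    cases F with
    | cons u F =>
      simp only [if_neg (List.cons_ne_nil u F)] at hm
      obtain ⟨f, rfl⟩ : ∃ f, fuel = f + 1 := ⟨fuel - 1, by simp at hfuel; omega⟩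
      have hu : D.get? u = some d := hF u (List.mem_cons_self ..)
      have hnsk : ∀ v ∈ (PySem.Dict.mk graph).getD u [], v ∈ graph.flatMap (fun p => p.2) :=
        fun v hv => getD_mk_subset graph u v hv
      obtain ⟨e1, e2, e3, e4, e5, e6⟩ := afold_expand (graph.flatMap (fun p => p.2)) k u d hd F
        ((PySem.Dict.mk graph).getD u []) acc D V hu hmem
        (fun y hy => hF y (List.mem_cons_of_mem _ hy)) hacc hnsk
      simp only [bfsLoop, List.cons_append]
      rw [e1]
      rw [ih f d F (((PySem.Dict.mk graph).getD u []).foldl bfsBStep (acc, V)).1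
        (((PySem.Dict.mk graph).getD u []).foldl (bfsAStep k u) (F ++ acc, D)).2
        (((PySem.Dict.mk graph).getD u []).foldl bfsBStep (acc, V)).2
        (a + (u + 1))
        (by split <;> omega)
        hd e4 e5 e3
        (by simp only [List.length_cons] at hfuel; omega)]
      have hlev : bfsExpand graph (acc, V) u
          = ((PySem.Dict.mk graph).getD u []).foldl bfsBStep (acc, V) := rfl
      simp only [List.foldl_cons, hlev, sumPlus_cons]
      have : a + (u + 1) + sumPlus F = a + ((u + 1) + sumPlus F) := by ring
      rw [this]
    | nil =>
      cases acc with
      | nil => simp [bfsAltLoop]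
      | cons w acc =>
        by_cases hk2 : d + 1 + 1 ≤ k
        · have hnat : (k - (d + 1)).toNat = (k - (d + 1 + 1)).toNat + 1 := by omega
          simp only [List.nil_append, List.foldl_nil, hnat, bfsAltLoop]
          have := ih fuel (d + 1) (w :: acc) [] D V a
            (by simp at hm ⊢; omega)
            hk2 hacc (by intro v hv; cases hv) hmem
            (by simp at hfuel ⊢; omega)
          simp only [List.append_nil] at this
          rw [this, count_fold]
          simp
        · have hnat : (k - (d + 1)).toNat = 0 := by omega
          simp only [List.nil_append, List.foldl_nil, hnat, bfsAltLoop]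
          rw [bfsLoop_drain graph k (d + 1) hk2 (w :: acc) fuel D a
            (by simp at hfuel ⊢; omega) hacc]
          rw [count_fold]
          simp

-- ===== VERDICT (by name: the statement is the Claim_ definition above) =====
theorem bfs_spec : Claim_equal_bfs := by
  intro x k graph _ _
  unfold Spec_bfs bfs bfs_alt
  have hD0 : ∀ w : Int, (PySem.Dict.empty.insert x 0 : PySem.Dict Int Int).get? w
      = if w = x then some 0 else none := by
    intro w
    rcases eq_or_ne w x with h | h
    · subst h; simp [PySem.Dict.get?_insert_self]
    · rw [PySem.Dict.get?_insert_of_ne (hne := h), if_neg h, PySem.Dict.get?_empty]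
  have hset : (PySem.Set.ofList [x] : PySem.Set Int) = [x] := rfl
  by_cases hk : 0 + 1 ≤ k
  · have hnat : k.toNat = (k - (0 + 1)).toNat + 1 := by omega
    have hmain := bfsLoop_eq_alt graph k
      (2 * ((graph.flatMap (fun p => p.2)).length + 2)) ((graph.flatMap (fun p => p.2)).length + 2)
      0 [x] [] (PySem.Dict.empty.insert x 0) (PySem.Set.ofList [x]) 0
      (by simp)
      hk
      (by intro u hu; rcases List.mem_singleton.mp hu with rfl; rw [hD0]; simp)
      (by intro v hv; cases hv)
      (by
        intro w
        rw [hD0]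
        rcases eq_or_ne w x with h | h
        · subst h; simp [PySem.Set.mem_ofList]
        · simp [PySem.Set.mem_ofList, h])
      (by
        have h1 : freshCount (graph.flatMap (fun p => p.2)) (PySem.Dict.empty.insert x 0)
            ≤ (graph.flatMap (fun p => p.2)).length := List.length_filter_le _ _
        simp only [List.length_cons, List.length_nil]
        omega)
    simp only [List.append_nil, sumPlus_nil, sumPlus_cons] at hmain
    rw [hmain, hnat]
    simp only [bfsAltLoop, List.foldl_cons, List.foldl_nil, hset]
    norm_num
  · have hdrain := bfsLoop_drain graph k 0 hk [x] ((graph.flatMap (fun p => p.2)).length + 2)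
      (PySem.Dict.empty.insert x 0) 0 (by simp)
      (by intro u hu; rcases List.mem_singleton.mp hu with rfl; rw [hD0]; simp)
    rw [hdrain]
    have hnat : k.toNat = 0 := by omega
    rw [hnat, hset]
    simp [bfsAltLoop]
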